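-- pv_equiv track=rewrite | github.com/HarutyunSoghomonyan/python_script | fail2ban.py | logAnalyzer
-- ===== SOURCE A (Python) =====
-- def logAnalyzer(logs):
--     ip_tracker = {}
--     for log in logs:
--         current_ip = log["ip"]
--         if log["status"] == "failed":
--             if current_ip in ip_tracker:
--                 ip_tracker[current_ip] += 1
--             else:
--                 ip_tracker[current_ip] = 1
--         else:
--                 ip_tracker[current_ip] = 0
--     return ip_tracker
-- ===== SOURCE B (Python) =====
-- def logAnalyzer(logs):
--     # Build an index: ip -> list of its statuses, in first-appearance order.
--     groups = {}
--     for log in logs: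
--         groups.setdefault(log["ip"], []).append(log["status"])
--     # For each ip, the answer is the length of the trailing run of "failed".
--     result = {}
--     for ip, statuses in groups.items():
--         run = 0
--         for s in statuses:
--             run = run + 1 if s == "failed" else 0
--         result[ip] = run
--     return result
-- ===== Notes on version B (the rewrite author's own statement) =====
-- stated objective: alternative
-- what changed: Replaces A's single interleaved running-counter dict scan with a two-phase shape: one pass groups each IP's statuses into an index dict (first-appearance order), then a per-IP pass computes the trailing run of 'failed' and builds the result dict in index order.
import Mathlib
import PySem

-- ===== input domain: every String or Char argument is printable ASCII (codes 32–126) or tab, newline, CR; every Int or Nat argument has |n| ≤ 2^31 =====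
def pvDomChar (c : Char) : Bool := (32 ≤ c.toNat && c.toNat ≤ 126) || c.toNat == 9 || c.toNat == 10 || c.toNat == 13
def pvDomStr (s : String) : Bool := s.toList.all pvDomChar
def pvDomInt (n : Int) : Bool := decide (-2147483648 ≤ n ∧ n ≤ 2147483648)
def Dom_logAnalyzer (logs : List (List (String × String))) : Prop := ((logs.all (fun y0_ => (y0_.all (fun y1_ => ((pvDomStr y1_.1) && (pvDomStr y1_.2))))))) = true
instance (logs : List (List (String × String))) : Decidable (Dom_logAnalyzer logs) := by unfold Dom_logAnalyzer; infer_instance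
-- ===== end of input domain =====

-- B groups statuses by IP first and then computes each IP's trailing failed-run,
-- replacing A's interleaved running-counter dict scan (objective: alternative decomposition; same cost).

-- ===== PORT A =====
-- one iteration of A's loop body over the tracker dict
def logAnalyzerStepA (tracker : PySem.Dict String Int) (log : List (String × String)) :
    PySem.Dict String Int :=
  match (PySem.Dict.mk log).get? "ip" with
  | none => tracker            -- KeyError in Python: excluded by Pre_
  | some ip =>
    match (PySem.Dict.mk log).get? "status" with
    | none => tracker          -- KeyError in Python: excluded by Pre_
    | some st =>
      if st == "failed" then
        if tracker.contains ip then tracker.insert ip (tracker.getD ip 0 + 1)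
        else tracker.insert ip 1
      else tracker.insert ip 0

def logAnalyzer (logs : List (List (String × String))) : List (String × Int) :=
  (logs.foldl logAnalyzerStepA PySem.Dict.empty).items

-- ===== PORT B =====
-- groups.setdefault(log["ip"], []).append(log["status"])
def logAnalyzerGroupStep (g : PySem.Dict String (List String)) (log : List (String × String)) :
    PySem.Dict String (List String) :=
  match (PySem.Dict.mk log).get? "ip" with
  | none => g                  -- KeyError in Python: excluded by Pre_
  | some ip =>
    match (PySem.Dict.mk log).get? "status" with
    | none => g                -- KeyError in Python: excluded by Pre_
    | some st => g.modify ip [] (· ++ [st])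

-- length of the trailing run of "failed" in a status list
def logAnalyzerRun (statuses : List String) : Int :=
  statuses.foldl (fun run s => if s == "failed" then run + 1 else 0) 0

def logAnalyzer_alt (logs : List (List (String × String))) : List (String × Int) :=
  (((logs.foldl logAnalyzerGroupStep PySem.Dict.empty).items).foldl
      (fun r p => r.insert p.1 (logAnalyzerRun p.2)) PySem.Dict.empty).items

-- ===== PRECONDITION & SPEC =====
-- Pre_ excludes exactly the logs missing an "ip" or "status" key, on which Python A raises KeyError.
def Pre_logAnalyzer (logs : List (List (String × String))) : Prop :=
  ∀ log ∈ logs, (PySem.Dict.mk log).contains "ip" = true ∧ (PySem.Dict.mk log).contains "status" = true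
instance (logs : List (List (String × String))) : Decidable (Pre_logAnalyzer logs) := by
  unfold Pre_logAnalyzer; infer_instance
def pvWitness_logAnalyzer : (List (List (String × String))) :=
  [[("ip", "1.2.3.4"), ("status", "failed")], [("ip", "1.2.3.4"), ("status", "ok")]]

def Spec_logAnalyzer (logs : List (List (String × String))) (out : List (String × Int)) : Prop := out = logAnalyzer_alt logs
instance (logs : List (List (String × String))) (out : List (String × Int)) : Decidable (Spec_logAnalyzer logs out) := by unfold Spec_logAnalyzer; infer_instance

-- ===== CLAIM (what is proved, stated in full; the proofs are below) =====
def Claim_equal_logAnalyzer : Prop := ∀ (logs : List (List (String × String))), Dom_logAnalyzer logs → Pre_logAnalyzer logs → Spec_logAnalyzer logs (logAnalyzer logs)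

-- ===== LEMMAS AND PROOFS =====

lemma logAnalyzerRun_append_singleton (l : List String) (s : String) :
    logAnalyzerRun (l ++ [s]) = if s == "failed" then logAnalyzerRun l + 1 else 0 := by
  simp [logAnalyzerRun, List.foldl_append]

-- the step functions preserve the tracker/groups relation
lemma logAnalyzer_step_inv (t : PySem.Dict String Int) (g : PySem.Dict String (List String))
    (log : List (String × String)) (hnd : g.keys.Nodup)
    (hrel : t.items = g.items.map (fun p => (p.1, logAnalyzerRun p.2))) :
    (logAnalyzerStepA t log).items =
      (logAnalyzerGroupStep g log).items.map (fun p => (p.1, logAnalyzerRun p.2)) ∧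
    (logAnalyzerGroupStep g log).keys.Nodup := by
  unfold logAnalyzerStepA logAnalyzerGroupStep
  cases hip : (PySem.Dict.mk log).get? "ip" with
  | none => exact ⟨hrel, hnd⟩
  | some ip =>
    cases hst : (PySem.Dict.mk log).get? "status" with
    | none => exact ⟨hrel, hnd⟩
    | some st =>
      dsimp only
      have hmod : g.modify ip [] (· ++ [st]) = g.insert ip (g.getD ip [] ++ [st]) := rfl
      have hkeys : t.keys = g.keys := by
        simp only [PySem.Dict.keys, hrel, List.map_map]; rfl
      have hcont : t.contains ip = g.contains ip := by
        rw [PySem.Dict.contains_eq_decide_mem_keys, PySem.Dict.contains_eq_decide_mem_keys, hkeys]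
      have hndt : t.keys.Nodup := by rw [hkeys]; exact hnd
      constructor
      · cases hgc : g.contains ip with
        | false =>
          have hget : g.getD ip [] = [] := PySem.Dict.getD_of_not_contains g [] hgc
          rw [hmod, PySem.Dict.items_insert_of_not_contains _ _ hgc, hget]
          by_cases hf : st = "failed"
          · simp only [hf, BEq.rfl, if_true, hcont, hgc, Bool.false_eq_true, if_false]
            rw [PySem.Dict.items_insert_of_not_contains _ _ (by rw [hcont]; exact hgc)]
            simp [hrel, logAnalyzerRun]
          · simp only [beq_iff_eq, hf, if_false]
            rw [PySem.Dict.items_insert_of_not_contains _ _ (by rw [hcont]; exact hgc)]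
            simp [hrel, logAnalyzerRun, hf]
        | true =>
          obtain ⟨L, hL⟩ : ∃ L, g.get? ip = some L := by
            have := PySem.Dict.contains_eq_isSome_get? (d := g) (k := ip)
            rw [hgc] at this
            exact Option.isSome_iff_exists.mp this.symm
          have hmemg : (ip, L) ∈ g.items := PySem.Dict.mem_items_of_get?_eq_some g hL
          have hgetg : g.getD ip [] = L := PySem.Dict.getD_of_get?_eq_some g [] hL
          have hmemt : (ip, logAnalyzerRun L) ∈ t.items := by
            rw [hrel]; exact List.mem_map_of_mem hmemg
          have hgett : t.getD ip 0 = logAnalyzerRun L :=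
            PySem.Dict.getD_of_mem_items t hmemt hndt 0
          rw [hmod, PySem.Dict.items_insert_of_contains _ _ hgc, hgetg]
          by_cases hf : st = "failed"
          · simp only [hf, BEq.rfl, if_true, hcont, hgc, hgett]
            rw [PySem.Dict.items_insert_of_contains _ _ (by rw [hcont]; exact hgc)]
            rw [hrel, List.map_map, List.map_map]
            apply List.map_congr_left
            intro p _
            by_cases hp : p.1 = ip
            · simp [hp, logAnalyzerRun_append_singleton]
            · simp [hp]
          · simp only [beq_iff_eq, hf, if_false]
            rw [PySem.Dict.items_insert_of_contains _ _ (by rw [hcont]; exact hgc)]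
            rw [hrel, List.map_map, List.map_map]
            apply List.map_congr_left
            intro p _
            by_cases hp : p.1 = ip
            · simp [hp, logAnalyzerRun_append_singleton, hf]
            · simp [hp]
      · rw [hmod]; exact PySem.Dict.nodup_keys_insert _ _ _ hnd

lemma logAnalyzer_fold_inv (logs : List (List (String × String))) :
    ∀ (t : PySem.Dict String Int) (g : PySem.Dict String (List String)),
      g.keys.Nodup → t.items = g.items.map (fun p => (p.1, logAnalyzerRun p.2)) →
      (logs.foldl logAnalyzerStepA t).items =
        (logs.foldl logAnalyzerGroupStep g).items.map (fun p => (p.1, logAnalyzerRun p.2)) ∧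
      (logs.foldl logAnalyzerGroupStep g).keys.Nodup := by
  induction logs with
  | nil => intro t g hnd hrel; exact ⟨hrel, hnd⟩
  | cons log rest ih =>
    intro t g hnd hrel
    obtain ⟨h1, h2⟩ := logAnalyzer_step_inv t g log hnd hrel
    exact ih _ _ h2 h1

-- ===== VERDICT (by name: the statement is the Claim_ definition above) =====
theorem logAnalyzer_spec : Claim_equal_logAnalyzer := by
  intro logs _ _
  unfold Spec_logAnalyzer logAnalyzer logAnalyzer_alt
  obtain ⟨hrel, hnd⟩ := logAnalyzer_fold_inv logs PySem.Dict.empty PySem.Dict.empty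
    PySem.Dict.nodup_keys_empty (by rfl)
  set g := logs.foldl logAnalyzerGroupStep PySem.Dict.empty with hg
  rw [hrel]
  rw [PySem.Dict.items_foldl_insert_fresh (l := g.items) (k := Prod.fst)
        (v := fun p => logAnalyzerRun p.2) (d := PySem.Dict.empty)
        (by intro a _; exact PySem.Dict.contains_empty _)
        (by simpa [PySem.Dict.keys] using hnd)]
  simp [PySem.Dict.empty]
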